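-- pv_equiv track=rewrite | github.com/druckhead/EduLabs-FullStack-Course | Lessons/Lesson_5/src/Homework/B5_List_Dictionary_Set/E3.py | exists_in_both
-- ===== SOURCE A (Python) =====
-- def exists_in_both(l1: list[str], l2: list[str]) -> set[str]:
--     l1_set = set()
--     l2_set = set()
--
--     for l in l1:
--         l1_set.add(l.lower())
--     for l in l2:
--         l2_set.add(l.lower())
--
--     return l1_set.intersection(l2_set)
-- ===== SOURCE B (Python) =====
-- def exists_in_both(l1: list[str], l2: list[str]) -> set[str]:
--     lows2 = [y.lower() for y in l2]
--     res = []
--     for x in l1: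
--         lx = x.lower()
--         if lx not in res and lx in lows2:
--             res.append(lx)
--     return set(res)
-- ===== Notes on version B (the rewrite author's own statement) =====
-- stated objective: alternative
-- what changed: Replaces the two hash sets and .intersection() with a set-free algorithm: pre-lower l2 into a plain list, then one loop over l1 keeps an ordered list accumulator, deduplicating by a linear scan of the accumulator and testing presence by a linear scan of the lowered l2 list.
import Mathlib
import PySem

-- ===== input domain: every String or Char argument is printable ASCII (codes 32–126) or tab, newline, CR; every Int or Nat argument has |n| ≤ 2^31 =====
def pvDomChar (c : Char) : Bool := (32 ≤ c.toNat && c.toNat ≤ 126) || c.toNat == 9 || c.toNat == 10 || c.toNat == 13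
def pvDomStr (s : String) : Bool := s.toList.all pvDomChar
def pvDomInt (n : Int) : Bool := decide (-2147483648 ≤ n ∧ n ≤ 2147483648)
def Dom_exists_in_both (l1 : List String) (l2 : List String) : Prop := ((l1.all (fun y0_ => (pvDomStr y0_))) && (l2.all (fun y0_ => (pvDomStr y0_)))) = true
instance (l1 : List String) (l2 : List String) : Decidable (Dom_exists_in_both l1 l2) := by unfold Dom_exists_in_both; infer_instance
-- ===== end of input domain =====

-- B is set-free: one loop over l1 with an ordered list accumulator, dedup by a linear
-- scan of the accumulator and presence in l2 by an inner linear scan (objective: alternative).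

-- ===== PORT A =====
def exists_in_both (l1 : List String) (l2 : List String) : List String :=
  let l1_set := l1.foldl (fun s l => PySem.Set.add s (PySem.Str.lower l)) PySem.Set.empty
  let l2_set := l2.foldl (fun s l => PySem.Set.add s (PySem.Str.lower l)) PySem.Set.empty
  PySem.Set.inter l1_set l2_set

-- ===== PORT B =====
def exists_in_both_alt (l1 : List String) (l2 : List String) : List String :=
  let lows2 := l2.map PySem.Str.lower
  let res := l1.foldl
    (fun res x =>
      let lx := PySem.Str.lower x
      if !res.contains lx && lows2.contains lx then res ++ [lx] else res)
    []
  PySem.Set.ofList res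

-- ===== PRECONDITION & SPEC =====
def Spec_exists_in_both (l1 : List String) (l2 : List String) (out : List String) : Prop := out = exists_in_both_alt l1 l2
instance (l1 : List String) (l2 : List String) (out : List String) : Decidable (Spec_exists_in_both l1 l2 out) := by unfold Spec_exists_in_both; infer_instance

-- ===== CLAIM (what is proved, stated in full; the proofs are below) =====
def Claim_equal_exists_in_both : Prop := ∀ (l1 : List String) (l2 : List String), Dom_exists_in_both l1 l2 → Spec_exists_in_both l1 l2 (exists_in_both l1 l2)

-- ===== LEMMAS AND PROOFS =====

-- one step of A's intersection, pushed through an add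
lemma inter_add_step (acc t : List String) (y : String) :
    PySem.Set.inter (PySem.Set.add acc y) t
      = if PySem.Set.contains t y then PySem.Set.add (PySem.Set.inter acc t) y
        else PySem.Set.inter acc t := by
  show List.filter _ (PySem.Set.add acc y) = _
  by_cases hy : y ∈ acc
  · rw [PySem.Set.add_of_mem hy]
    split_ifs with ht
    · have hmem : y ∈ PySem.Set.inter acc t := by
        simp only [PySem.Set.inter, List.mem_filter]
        exact ⟨hy, ht⟩
      rw [PySem.Set.add_of_mem hmem]
      rfl
    · rfl
  · rw [PySem.Set.add_of_not_mem hy]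
    show List.filter (fun x => PySem.Set.contains t x) (acc ++ [y]) = _
    rw [List.filter_append]
    split_ifs with ht
    · have hnm : y ∉ PySem.Set.inter acc t := by
        simp only [PySem.Set.inter, List.mem_filter]
        exact fun h => hy h.1
      have ht' : y ∈ t := (PySem.Set.contains_iff t y).mp ht
      rw [PySem.Set.add_of_not_mem hnm]
      simp [List.filter, ht', PySem.Set.inter]
    · have ht' : y ∉ t := fun h => ht ((PySem.Set.contains_iff t y).mpr h)
      simp [List.filter, ht', PySem.Set.inter]

-- A's intersection with t of the built l1-set = the conditional fold over l1
lemma inter_foldl (xs : List String) (t acc : List String) :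
    PySem.Set.inter (xs.foldl (fun s x => PySem.Set.add s (PySem.Str.lower x)) acc) t
      = xs.foldl
          (fun s x =>
            if PySem.Set.contains t (PySem.Str.lower x) then PySem.Set.add s (PySem.Str.lower x) else s)
          (PySem.Set.inter acc t) := by
  induction xs generalizing acc with
  | nil => rfl
  | cons x xs ih =>
      simp only [List.foldl_cons]
      rw [ih, inter_add_step]

-- membership of the built l2-set is B's linear scan of the pre-lowered list
lemma contains_l2set (l2 : List String) (v : String) :
    PySem.Set.contains (l2.foldl (fun s y => PySem.Set.add s (PySem.Str.lower y)) PySem.Set.empty) v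
      = (l2.map PySem.Str.lower).contains v := by
  have h : l2.foldl (fun s y => PySem.Set.add s (PySem.Str.lower y)) PySem.Set.empty
      = PySem.Set.ofList (l2.map PySem.Str.lower) := by
    rw [PySem.Set.ofList_eq_foldl, List.foldl_map]
    rfl
  rw [h]
  by_cases hv : v ∈ l2.map PySem.Str.lower
  · rw [List.contains_eq_mem, decide_eq_true hv]
    exact (PySem.Set.contains_iff _ _).mpr ((PySem.Set.mem_ofList _ _).mpr hv)
  · rw [List.contains_eq_mem, decide_eq_false hv, Bool.eq_false_iff]
    intro h
    exact hv ((PySem.Set.mem_ofList _ _).mp ((PySem.Set.contains_iff _ _).mp h))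

-- the per-element steps of the two folds agree on every state
lemma step_eq (l2 : List String) (t : List String)
    (ht : ∀ v, PySem.Set.contains t v = (l2.map PySem.Str.lower).contains v)
    (s : List String) (x : String) :
    (if PySem.Set.contains t (PySem.Str.lower x) then PySem.Set.add s (PySem.Str.lower x) else s)
      = (if !s.contains (PySem.Str.lower x) && (l2.map PySem.Str.lower).contains (PySem.Str.lower x)
         then s ++ [PySem.Str.lower x] else s) := by
  set lx := PySem.Str.lower x with hlx
  rw [← ht lx]
  by_cases hc : PySem.Set.contains t lx = true
  · rw [if_pos hc, hc]
    by_cases hs : lx ∈ s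
    · rw [PySem.Set.add_of_mem hs]
      simp [List.contains_eq_mem, hs]
    · rw [PySem.Set.add_of_not_mem hs]
      simp [List.contains_eq_mem, hs]
  · rw [if_neg hc, Bool.eq_false_iff.mpr hc]
    simp

-- A's conditional fold keeps the accumulator Nodup
lemma fold_nodup (xs : List String) (t acc : List String) (hacc : acc.Nodup) :
    (xs.foldl
        (fun s x =>
          if PySem.Set.contains t (PySem.Str.lower x) then PySem.Set.add s (PySem.Str.lower x) else s)
        acc).Nodup := by
  induction xs generalizing acc with
  | nil => exact hacc
  | cons x xs ih =>
      simp only [List.foldl_cons]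
      split_ifs with h
      · exact ih _ (PySem.Set.nodup_add _ _ hacc)
      · exact ih _ hacc

-- ===== VERDICT (by name: the statement is the Claim_ definition above) =====
theorem exists_in_both_spec : Claim_equal_exists_in_both := by
  intro l1 l2 _
  simp only [Spec_exists_in_both, exists_in_both, exists_in_both_alt]
  set t := l2.foldl (fun s y => PySem.Set.add s (PySem.Str.lower y)) PySem.Set.empty with htdef
  have hA : PySem.Set.inter (l1.foldl (fun s x => PySem.Set.add s (PySem.Str.lower x)) PySem.Set.empty) t
      = l1.foldl
          (fun s x =>
            if PySem.Set.contains t (PySem.Str.lower x) then PySem.Set.add s (PySem.Str.lower x) else s)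
          [] := by
    simpa using inter_foldl l1 t PySem.Set.empty
  have hfold : l1.foldl
        (fun s x =>
          if PySem.Set.contains t (PySem.Str.lower x) then PySem.Set.add s (PySem.Str.lower x) else s)
        []
      = l1.foldl
          (fun res x =>
            let lx := PySem.Str.lower x
            if !res.contains lx && (l2.map PySem.Str.lower).contains lx then res ++ [lx] else res)
          [] := by
    apply List.foldl_ext
    intro s x _
    exact step_eq l2 t (fun v => contains_l2set l2 v) s x
  have hnodup := fold_nodup l1 t [] List.nodup_nil
  rw [hA, hfold]
  exact (PySem.Set.ofList_eq_self_of_nodup _ (hfold ▸ hnodup)).symm
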